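-- pv_equiv track=rewrite | github.com/loganhw/hewei | mahjong_project/server/main/table.py | _is_seven_pairs
-- ===== SOURCE A (Python) =====
-- def _is_seven_pairs(board, board_list):
-- 	u"""七对胡牌."""
-- 	board_list.append(board)
-- 	board_list.sort()
--
-- 	if len(board_list) != 14:
-- 		return False
--
-- 	# 去重之后直接判断相同的牌的数量
-- 	for temp_board in set(board_list):
-- 		if board_list.count(temp_board) not in [2, 4]:
-- 			return False
--
-- 	return True
-- ===== SOURCE B (Python) =====
-- def _is_seven_pairs(board, board_list):
--     board_list.append(board)
--     board_list.sort()
--     if len(board_list) != 14: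
--         return False
--     i = 0
--     while i < 14:
--         j = i
--         while j < 14 and board_list[j] == board_list[i]:
--             j += 1
--         if j - i != 2 and j - i != 4:
--             return False
--         i = j
--     return True
-- ===== Notes on version B (the rewrite author's own statement) =====
-- stated objective: alternative
-- what changed: Replaces the dedup-set plus repeated list.count rescans with a single run-length scan over the already-sorted list, checking each run length is 2 or 4.
import Mathlib
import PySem

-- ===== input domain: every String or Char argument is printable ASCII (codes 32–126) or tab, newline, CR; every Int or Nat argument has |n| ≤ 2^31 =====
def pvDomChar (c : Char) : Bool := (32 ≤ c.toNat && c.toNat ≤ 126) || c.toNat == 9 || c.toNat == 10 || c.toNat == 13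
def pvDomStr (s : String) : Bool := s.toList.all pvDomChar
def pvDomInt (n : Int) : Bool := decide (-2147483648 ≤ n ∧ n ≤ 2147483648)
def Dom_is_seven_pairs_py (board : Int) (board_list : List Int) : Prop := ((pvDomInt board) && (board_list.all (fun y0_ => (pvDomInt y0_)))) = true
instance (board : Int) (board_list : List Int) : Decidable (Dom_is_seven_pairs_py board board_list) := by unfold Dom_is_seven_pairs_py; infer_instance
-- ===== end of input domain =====

-- B replaces A's dedup-set + repeated list.count rescans with one run-length scan of the
-- sorted list (alternative decomposition; return value proved equal — both mutate board_list identically).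


-- ===== PORT A =====
-- for temp_board in set(board_list): if board_list.count(temp_board) not in [2,4]: return False
def aLoop (s : List Int) (bl : List Int) : Bool :=
  match s with
  | [] => true
  | t :: ts =>
    if ¬ (bl.count t = 2 ∨ bl.count t = 4) then false
    else aLoop ts bl

def is_seven_pairs_py (board : Int) (board_list : List Int) : Bool :=
  let bl := PySem.List.sorted (board_list ++ [board]) (fun x => x) false
  if bl.length ≠ 14 then false
  else aLoop (PySem.Set.ofList bl) bl

-- ===== PORT B =====
-- single run-length scan of the sorted list: each maximal run must have length 2 or 4
def altLoop (l : List Int) : Bool :=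
  match l with
  | [] => true
  | x :: xs =>
    let run := (xs.takeWhile (· == x)).length + 1
    if run ≠ 2 ∧ run ≠ 4 then false
    else altLoop (xs.dropWhile (· == x))
termination_by l.length
decreasing_by
  simp only [List.length_cons]
  exact Nat.lt_succ_of_le (List.length_dropWhile_le _ _)

def is_seven_pairs_py_alt (board : Int) (board_list : List Int) : Bool :=
  let bl := PySem.List.sorted (board_list ++ [board]) (fun x => x) false
  if bl.length ≠ 14 then false
  else altLoop bl

-- ===== PRECONDITION & SPEC =====
def Spec_is_seven_pairs_py (board : Int) (board_list : List Int) (out : Bool) : Prop := out = is_seven_pairs_py_alt board board_list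
instance (board : Int) (board_list : List Int) (out : Bool) : Decidable (Spec_is_seven_pairs_py board board_list out) := by unfold Spec_is_seven_pairs_py; infer_instance

-- ===== CLAIM (what is proved, stated in full; the proofs are below) =====
def Claim_equal_is_seven_pairs_py : Prop := ∀ (board : Int) (board_list : List Int), Dom_is_seven_pairs_py board board_list → Spec_is_seven_pairs_py board board_list (is_seven_pairs_py board board_list)

-- ===== LEMMAS AND PROOFS =====

def goodCount (bl : List Int) (t : Int) : Bool := bl.count t == 2 || bl.count t == 4

theorem aLoop_eq_all (s bl : List Int) : aLoop s bl = s.all (goodCount bl) := by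
  induction s with
  | nil => rfl
  | cons t ts ih =>
    unfold aLoop
    by_cases h : bl.count t = 2 ∨ bl.count t = 4
    · rw [if_neg (not_not_intro h), ih, List.all_cons]
      have hg : goodCount bl t = true := by
        unfold goodCount; rcases h with h | h <;> simp [h]
      rw [hg, Bool.true_and]
    · rw [if_pos h, List.all_cons]
      have hg : goodCount bl t = false := by
        unfold goodCount; push_neg at h; simp [h.1, h.2]
      rw [hg, Bool.false_and]

theorem all_ofList (p : Int → Bool) (l : List Int) :
    (PySem.Set.ofList l).all p = l.all p := by
  rw [Bool.eq_iff_iff, List.all_eq_true, List.all_eq_true]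
  constructor
  · intro h x hx; exact h x ((PySem.Set.mem_ofList l x).mpr hx)
  · intro h x hx; exact h x ((PySem.Set.mem_ofList l x).mp hx)

theorem dropWhile_head_false {α : Type} (p : α → Bool) (xs : List α) :
    ∀ d ds, xs.dropWhile p = d :: ds → p d = false := by
  induction xs with
  | nil => intro d ds h; simp [List.dropWhile] at h
  | cons a as ih =>
    intro d ds h
    simp only [List.dropWhile_cons] at h
    by_cases hpa : p a = true
    · rw [if_pos hpa] at h; exact ih d ds h
    · rw [if_neg hpa] at h
      injection h with h1 _
      subst h1
      simpa using hpa

-- every element past the leading run of a sorted list is strictly greater than the head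
theorem dropWhile_gt (x : Int) (xs : List Int) (hs : (x :: xs).Pairwise (· ≤ ·)) :
    ∀ y ∈ xs.dropWhile (· == x), x < y := by
  intro y hy
  have hxle : ∀ y ∈ xs, x ≤ y := (List.pairwise_cons.mp hs).1
  have hpw_dw : (xs.dropWhile (· == x)).Pairwise (· ≤ ·) :=
    ((List.pairwise_cons.mp hs).2).sublist (List.dropWhile_sublist _)
  cases hdwe : xs.dropWhile (· == x) with
  | nil => rw [hdwe] at hy; simp at hy
  | cons d ds =>
    have hsub : (d :: ds).Sublist xs := hdwe ▸ List.dropWhile_sublist _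
    have hdne : d ≠ x := by
      have := dropWhile_head_false (· == x) xs d ds hdwe
      simpa using this
    have hxd : x < d := lt_of_le_of_ne (hxle d (hsub.mem (by simp))) (Ne.symm hdne)
    rw [hdwe] at hy hpw_dw
    rcases List.mem_cons.mp hy with hy | hy
    · exact hy ▸ hxd
    · exact lt_of_lt_of_le hxd ((List.pairwise_cons.mp hpw_dw).1 y hy)

theorem count_head_run (x : Int) (xs : List Int) (hs : (x :: xs).Pairwise (· ≤ ·)) :
    (x :: xs).count x = (xs.takeWhile (· == x)).length + 1 := by
  have hsplit : xs.takeWhile (· == x) ++ xs.dropWhile (· == x) = xs :=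
    List.takeWhile_append_dropWhile
  have htwc : (xs.takeWhile (· == x)).count x = (xs.takeWhile (· == x)).length := by
    rw [List.count_eq_length]
    intro b hb
    have hb' : b = x := by simpa using List.mem_takeWhile_imp hb
    exact hb'.symm
  have hdw0 : (xs.dropWhile (· == x)).count x = 0 := by
    rw [List.count_eq_zero]
    intro h
    exact absurd (dropWhile_gt x xs hs x h) (lt_irrefl x)
  conv_lhs => rw [show xs = xs.takeWhile (· == x) ++ xs.dropWhile (· == x) from hsplit.symm]
  rw [List.count_cons, List.count_append, htwc, hdw0]
  simp [Nat.add_comm]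

theorem count_tail (x : Int) (xs : List Int) (hs : (x :: xs).Pairwise (· ≤ ·))
    (y : Int) (hy : y ∈ xs.dropWhile (· == x)) :
    (x :: xs).count y = (xs.dropWhile (· == x)).count y := by
  have hyx : y ≠ x := fun h => absurd (dropWhile_gt x xs hs y hy) (h ▸ lt_irrefl x)
  have htw0 : (xs.takeWhile (· == x)).count y = 0 := by
    rw [List.count_eq_zero]
    intro h
    have := List.mem_takeWhile_imp h
    exact hyx (by simpa using this)
  have hsplit : xs.takeWhile (· == x) ++ xs.dropWhile (· == x) = xs :=
    List.takeWhile_append_dropWhile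
  conv_lhs => rw [show xs = xs.takeWhile (· == x) ++ xs.dropWhile (· == x) from hsplit.symm]
  rw [List.count_cons, List.count_append, htw0]
  simp [Ne.symm hyx]

theorem altLoop_eq_all (l : List Int) (hs : l.Pairwise (· ≤ ·)) :
    altLoop l = l.all (goodCount l) := by
  induction l using altLoop.induct with
  | case1 => simp [altLoop]
  | case2 x xs _run hbad =>
    have hbad' : (xs.takeWhile (· == x)).length + 1 ≠ 2 ∧ (xs.takeWhile (· == x)).length + 1 ≠ 4 := hbad
    have hcnt := count_head_run x xs hs
    have hx : goodCount (x :: xs) x = false := by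
      simp only [goodCount, hcnt]
      simp
      omega
    simp only [altLoop]
    rw [if_pos hbad']
    simp only [List.all_cons, hx, Bool.false_and]
  | case3 x xs _run hok ih =>
    have hok' : ¬ ((xs.takeWhile (· == x)).length + 1 ≠ 2 ∧ (xs.takeWhile (· == x)).length + 1 ≠ 4) := hok
    have hpw : xs.Pairwise (· ≤ ·) := (List.pairwise_cons.mp hs).2
    have hpw_dw : (xs.dropWhile (· == x)).Pairwise (· ≤ ·) :=
      hpw.sublist (List.dropWhile_sublist _)
    have hsplit : xs.takeWhile (· == x) ++ xs.dropWhile (· == x) = xs :=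
      List.takeWhile_append_dropWhile
    have htw_all : ∀ b ∈ xs.takeWhile (· == x), b = x := by
      intro b hb
      simpa using List.mem_takeWhile_imp hb
    have hcnt := count_head_run x xs hs
    have hgood_x : goodCount (x :: xs) x = true := by
      simp only [goodCount, hcnt]
      rcases not_and_or.mp hok' with h | h
      · simp [not_ne_iff.mp h]
      · simp [not_ne_iff.mp h]
    simp only [altLoop]
    rw [if_neg hok', ih hpw_dw]
    have hdw_congr :
        (xs.dropWhile (· == x)).all (goodCount (xs.dropWhile (· == x)))
          = (xs.dropWhile (· == x)).all (goodCount (x :: xs)) := by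
      rw [Bool.eq_iff_iff, List.all_eq_true, List.all_eq_true]
      constructor <;> intro h y hy
      · rw [goodCount, count_tail x xs hs y hy, ← goodCount]; exact h y hy
      · rw [goodCount, ← count_tail x xs hs y hy, ← goodCount]; exact h y hy
    rw [hdw_congr]
    rw [Bool.eq_iff_iff, List.all_eq_true, List.all_eq_true]
    constructor
    · intro h y hy
      rcases List.mem_cons.mp hy with rfl | hy'
      · exact hgood_x
      · rcases List.mem_append.mp (show y ∈ xs.takeWhile (· == x) ++ xs.dropWhile (· == x) by
          rw [hsplit]; exact hy') with htw | hdw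
        · rw [htw_all y htw]; exact hgood_x
        · exact h y hdw
    · intro h y hy
      exact h y (List.mem_cons_of_mem x ((List.dropWhile_sublist _).subset hy))

-- ===== VERDICT (by name: the statement is the Claim_ definition above) =====
theorem is_seven_pairs_py_spec : Claim_equal_is_seven_pairs_py := by
  intro board board_list _
  unfold Spec_is_seven_pairs_py
  simp only [is_seven_pairs_py, is_seven_pairs_py_alt]
  by_cases h : (PySem.List.sorted (board_list ++ [board]) (fun x => x) false).length ≠ 14
  · rw [if_pos h, if_pos h]
  · rw [if_neg h, if_neg h, aLoop_eq_all, all_ofList,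
      altLoop_eq_all _ (PySem.List.sorted_pairwise _ _)]
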